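-- pv_equiv track=rewrite | github.com/michaelpeeri/rnafold-public | codon_randomization.py | make_full_back_table
-- ===== SOURCE A (Python) =====
-- def make_full_back_table(forward_table):
--     ret = {}
--     for codon,aa in forward_table.items():
--         codon = codon.lower()
--         if aa is None:
--             continue
--
--         if aa in ret:
--             ret[aa].append(codon)
--         else:
--             ret[aa] = [codon]
--     return ret
-- ===== SOURCE B (Python) =====
-- def make_full_back_table(forward_table):
--     # Gather pass: filter+normalize once, then build each amino acid's codon list
--     # by scanning the filtered pairs (keys in first-occurrence order).
--     pairs = [(aa, codon.lower()) for codon, aa in forward_table.items() if aa is not None]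
--     keys = dict.fromkeys(aa for aa, _ in pairs)
--     return {aa: [c for a, c in pairs if a == aa] for aa in keys}
-- ===== Notes on version B (the rewrite author's own statement) =====
-- stated objective: alternative
-- what changed: A scatters each codon into a dict accumulator in one pass; B first builds a filtered lowercased (aa, codon) pair list, dedups the amino acids in first-occurrence order, and gathers each amino acid's codon list by a per-key scan of the pairs.
import Mathlib
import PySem

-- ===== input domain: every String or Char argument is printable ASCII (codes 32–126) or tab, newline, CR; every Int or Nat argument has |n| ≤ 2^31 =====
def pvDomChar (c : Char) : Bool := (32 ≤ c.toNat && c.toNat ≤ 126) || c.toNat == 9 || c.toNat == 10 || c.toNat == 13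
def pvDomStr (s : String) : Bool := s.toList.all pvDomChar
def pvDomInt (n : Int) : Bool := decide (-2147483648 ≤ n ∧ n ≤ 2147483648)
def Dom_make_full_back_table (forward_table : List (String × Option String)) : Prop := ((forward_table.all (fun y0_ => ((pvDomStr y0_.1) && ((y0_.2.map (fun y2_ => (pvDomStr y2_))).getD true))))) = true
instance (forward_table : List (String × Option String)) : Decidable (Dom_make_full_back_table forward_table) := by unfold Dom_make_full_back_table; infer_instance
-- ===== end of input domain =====

-- B replaces A's single-pass dict scatter/accumulate with a filter-normalize pass,
-- an ordered key dedup, and a per-key gather scan (objective: alternative decomposition, not faster).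


-- ===== PORT A =====
-- ret = {}; for codon, aa in forward_table.items(): codon = codon.lower();
--   if aa is None: continue; if aa in ret: ret[aa].append(codon) else ret[aa] = [codon]
def make_full_back_table (forward_table : List (String × Option String)) : List (String × List String) :=
  (forward_table.foldl (fun ret p =>
      let codon := PySem.Str.lower p.1
      match p.2 with
      | none => ret
      | some aa =>
        if ret.contains aa then ret.modify aa [] (· ++ [codon])
        else ret.insert aa [codon])
    (PySem.Dict.empty : PySem.Dict String (List String))).items

-- ===== PORT B =====
-- pairs = [(aa, codon.lower()) for codon, aa in forward_table.items() if aa is not None]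
-- keys = dict.fromkeys(aa for aa, _ in pairs); return {aa: [c for a, c in pairs if a == aa] for aa in keys}
def make_full_back_table_alt (forward_table : List (String × Option String)) : List (String × List String) :=
  let pairs : List (String × String) :=
    forward_table.filterMap (fun p => p.2.map (fun aa => (aa, PySem.Str.lower p.1)))
  let keys := PySem.List.dedup (pairs.map (·.1))
  keys.map (fun aa => (aa, (pairs.filter (fun q => q.1 == aa)).map (·.2)))

-- ===== PRECONDITION & SPEC =====
def Spec_make_full_back_table (forward_table : List (String × Option String)) (out : List (String × List String)) : Prop := out = make_full_back_table_alt forward_table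
instance (forward_table : List (String × Option String)) (out : List (String × List String)) : Decidable (Spec_make_full_back_table forward_table out) := by unfold Spec_make_full_back_table; infer_instance

-- ===== CLAIM (what is proved, stated in full; the proofs are below) =====
def Claim_equal_make_full_back_table : Prop := ∀ (forward_table : List (String × Option String)), Dom_make_full_back_table forward_table → Spec_make_full_back_table forward_table (make_full_back_table forward_table)

-- ===== LEMMAS AND PROOFS =====

-- A's insert-on-fresh-key branch is exactly a `modify` with default [].
lemma insert_eq_modify_of_not_contains (d : PySem.Dict String (List String)) (k v : String)
    (h : d.contains k = false) : d.insert k [v] = d.modify k [] (· ++ [v]) := by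
  simp only [PySem.Dict.modify, PySem.Dict.getD_of_not_contains (h := h), List.nil_append]

-- A's loop over the raw table equals the modify-loop over B's filtered pairs.
lemma foldl_A_eq_foldl_modify (forward_table : List (String × Option String))
    (d : PySem.Dict String (List String)) :
    forward_table.foldl (fun ret p =>
      let codon := PySem.Str.lower p.1
      match p.2 with
      | none => ret
      | some aa =>
        if ret.contains aa then ret.modify aa [] (· ++ [codon])
        else ret.insert aa [codon]) d
    = (forward_table.filterMap (fun p => p.2.map (fun aa => (aa, PySem.Str.lower p.1)))).foldl
        (fun ret q => ret.modify q.1 [] (· ++ [q.2])) d := by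
  induction forward_table generalizing d with
  | nil => rfl
  | cons hd tl ih =>
    rcases hd with ⟨c, aa⟩
    cases aa with
    | none => simpa using ih d
    | some a =>
      simp only [List.foldl_cons, List.filterMap_cons, Option.map_some]
      by_cases h : d.contains a = true
      · simp [h, ih]
      · rw [show (if d.contains a = true then d.modify a [] (· ++ [PySem.Str.lower c])
              else d.insert a [PySem.Str.lower c]) = d.modify a [] (· ++ [PySem.Str.lower c]) by
            rw [if_neg h, insert_eq_modify_of_not_contains d a _ (by simpa using h)]]
        exact ih _

-- ===== VERDICT (by name: the statement is the Claim_ definition above) =====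
theorem make_full_back_table_spec : Claim_equal_make_full_back_table := by
  intro ft _
  unfold Spec_make_full_back_table make_full_back_table make_full_back_table_alt
  rw [foldl_A_eq_foldl_modify]
  set pairs := ft.filterMap (fun p => p.2.map (fun aa => (aa, PySem.Str.lower p.1))) with hp
  have hnd : (pairs.foldl (fun ret q => ret.modify q.1 [] (· ++ [q.2]))
      (PySem.Dict.empty : PySem.Dict String (List String))).keys.Nodup := by
    exact PySem.Dict.nodup_keys_foldl_modify_key pairs (·.1) [] (fun d q => (· ++ [q.2])) _
      (by simp)
  rw [PySem.Dict.items_eq_map_keys _ hnd []]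
  have hkeys : (pairs.foldl (fun ret q => ret.modify q.1 [] (· ++ [q.2]))
      (PySem.Dict.empty : PySem.Dict String (List String))).keys
      = PySem.List.dedup (pairs.map (·.1)) := by
    rw [PySem.Dict.keys_foldl_modify_key pairs (·.1) [] (fun d q => (· ++ [q.2]))]
    simp [PySem.Set.update, PySem.List.dedup, PySem.Set.ofList, PySem.Dict.keys_empty]
  rw [hkeys]
  refine List.map_congr_left (fun a _ => ?_)
  rw [PySem.Dict.getD_foldl_modify_append]
  simp [PySem.Dict.getD_empty]
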